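-- pv_equiv track=rewrite | github.com/mathematicalninja/PersonalSite | pages/nlogn/computation.py | twoSeq
-- ===== SOURCE A (Python) =====
-- from math import floor, ceil
--
-- def twoSeq(n:int)->int:
--     if n==0:
--         return 0
--     if n==1:
--         return 1
--     if n==2:
--         return 1
--
--     return twoSeq(floor(n/2)) + twoSeq(ceil(n/2)) + n-1
-- ===== SOURCE B (Python) =====
-- def twoSeq(n: int) -> int:
--     # At every recursion depth A's call tree contains only the two adjacent
--     # subproblems floor(n/2^k) and ceil(n/2^k) = lo and lo+1.  Walk down once,
--     # tracking the value as x*T(lo) + y*T(lo+1) + c.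
--     if n == 0:
--         return 0
--     lo, x, y, c = n, 1, 0, 0
--     while lo > 2:
--         c += x * (lo - 1) + y * lo
--         if lo % 2:
--             x, y = x, x + 2 * y
--         else:
--             x, y = 2 * x + y, y
--         lo //= 2
--     t_lo, t_hi = (1, 4) if lo == 2 else (1, 1)  # T(2)=1, T(3)=4; T(1)=T(2)=1
--     return x * t_lo + y * t_hi + c
-- ===== Notes on version B (the rewrite author's own statement) =====
-- stated objective: faster
-- what changed: replaced A's exponential binary recursion tree with a single O(log n) halving loop that tracks the coefficients of the two adjacent subproblems floor(n/2^k) and ceil(n/2^k)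
import Mathlib
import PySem

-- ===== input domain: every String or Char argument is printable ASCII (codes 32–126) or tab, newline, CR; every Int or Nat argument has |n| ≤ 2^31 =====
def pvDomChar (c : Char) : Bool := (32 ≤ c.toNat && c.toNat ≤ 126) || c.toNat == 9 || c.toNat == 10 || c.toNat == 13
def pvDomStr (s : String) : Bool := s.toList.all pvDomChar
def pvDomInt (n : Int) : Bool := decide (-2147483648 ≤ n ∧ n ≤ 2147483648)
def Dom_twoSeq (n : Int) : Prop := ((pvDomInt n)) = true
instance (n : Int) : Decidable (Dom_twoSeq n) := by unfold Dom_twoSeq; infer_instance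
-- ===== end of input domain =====

-- B replaces A's exponential recursion tree by an O(log n) loop over the two adjacent
-- subproblems floor(n/2^k), ceil(n/2^k), tracking their coefficients (objective: faster).


-- ===== PORT A =====
-- A's recursion on nonnegative ints (Pre_ excludes n < 0, where A's recursion never
-- terminates: RecursionError).  For 0 ≤ n ≤ 2^31, floor(n/2) = n/2 and ceil(n/2) = (n+1)/2
-- exactly (the float division is exact in that range).
def twoSeqNat : Nat → Int
  | 0 => 0
  | 1 => 1
  | 2 => 1
  | (m+3) => twoSeqNat ((m+3)/2) + twoSeqNat ((m+3+1)/2) + (m+3) - 1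
decreasing_by all_goals omega

def twoSeq (n : Int) : Int := twoSeqNat n.toNat

-- ===== PORT B =====
-- the while-loop of Source B: state (lo, x, y, c), value = x*T(lo) + y*T(lo+1) + c
def twoSeqAltGo (lo : Nat) (x y c : Int) : Int :=
  if lo > 2 then
    twoSeqAltGo (lo / 2)
      (if lo % 2 = 1 then x else 2 * x + y)
      (if lo % 2 = 1 then x + 2 * y else y)
      (c + x * ((lo : Int) - 1) + y * (lo : Int))
  else
    x * 1 + y * (if lo = 2 then 4 else 1) + c
decreasing_by omega

def twoSeq_alt (n : Int) : Int :=
  if n = 0 then 0 else twoSeqAltGo n.toNat 1 0 0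

-- ===== PRECONDITION & SPEC =====
-- Pre_ excludes n < 0, where A's recursion never returns (Python RecursionError).
def Pre_twoSeq (n : Int) : Prop := 0 ≤ n
instance (n : Int) : Decidable (Pre_twoSeq n) := by unfold Pre_twoSeq; infer_instance
def pvWitness_twoSeq : Int := 5

def Spec_twoSeq (n : Int) (out : Int) : Prop := out = twoSeq_alt n
instance (n : Int) (out : Int) : Decidable (Spec_twoSeq n out) := by unfold Spec_twoSeq; infer_instance

-- ===== CLAIM (what is proved, stated in full; the proofs are below) =====
def Claim_equal_twoSeq : Prop := ∀ (n : Int), Dom_twoSeq n → Pre_twoSeq n → Spec_twoSeq n (twoSeq n)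

-- ===== LEMMAS AND PROOFS =====

-- the recurrence twoSeqNat satisfies for k ≥ 3
theorem twoSeqNat_rec (k : Nat) (h : 3 ≤ k) :
    twoSeqNat k = twoSeqNat (k / 2) + twoSeqNat ((k + 1) / 2) + (k : Int) - 1 := by
  obtain ⟨m, rfl⟩ : ∃ m, k = m + 3 := ⟨k - 3, by omega⟩
  rw [twoSeqNat]; push_cast; ring

theorem twoSeqNat_zero : twoSeqNat 0 = 0 := by simp [twoSeqNat]
theorem twoSeqNat_one : twoSeqNat 1 = 1 := by simp [twoSeqNat]
theorem twoSeqNat_two : twoSeqNat 2 = 1 := by simp [twoSeqNat]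
theorem twoSeqNat_three : twoSeqNat 3 = 4 := by
  rw [twoSeqNat_rec 3 (by omega)]; norm_num [twoSeqNat_one, twoSeqNat_two]

-- loop invariant: for lo ≥ 1 the loop computes x*T(lo) + y*T(lo+1) + c
theorem twoSeqAltGo_eq (lo : Nat) (hlo : 1 ≤ lo) :
    ∀ x y c : Int, twoSeqAltGo lo x y c = x * twoSeqNat lo + y * twoSeqNat (lo + 1) + c := by
  induction lo using Nat.strong_induction_on with
  | _ lo ih =>
    intro x y c
    rw [twoSeqAltGo]
    by_cases h : lo > 2
    · simp only [if_pos h]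
      rw [ih (lo / 2) (by omega) (by omega)]
      have hA : twoSeqNat lo = twoSeqNat (lo / 2) + twoSeqNat ((lo + 1) / 2) + (lo : Int) - 1 :=
        twoSeqNat_rec lo (by omega)
      have hB := twoSeqNat_rec (lo + 1) (by omega)
      rcases Nat.even_or_odd lo with he | ho
      · obtain ⟨m, rfl⟩ := he
        have hmod : ¬ (m + m) % 2 = 1 := by omega
        have e1 : (m + m) / 2 = m := by omega
        have e2 : (m + m + 1) / 2 = m := by omega
        have e3 : (m + m + 1 + 1) / 2 = m + 1 := by omega
        simp only [if_neg hmod, e1, e2, e3] at hA hB ⊢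
        rw [hA, hB]
        push_cast
        ring
      · obtain ⟨m, rfl⟩ := ho
        have hmod : (2 * m + 1) % 2 = 1 := by omega
        have e1 : (2 * m + 1) / 2 = m := by omega
        have e2 : (2 * m + 1 + 1) / 2 = m + 1 := by omega
        have e3 : (2 * m + 1 + 1 + 1) / 2 = m + 1 := by omega
        simp only [if_pos hmod, e1, e2, e3] at hA hB ⊢
        rw [hA, hB]
        push_cast
        ring
    · simp only [if_neg h]
      interval_cases lo
      · norm_num [twoSeqNat_one, twoSeqNat_two]
      · norm_num [twoSeqNat_two, twoSeqNat_three]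

-- ===== VERDICT (by name: the statement is the Claim_ definition above) =====
theorem twoSeq_spec : Claim_equal_twoSeq := by
  intro n _ hpre
  unfold Spec_twoSeq twoSeq twoSeq_alt
  by_cases h0 : n = 0
  · subst h0; simp [twoSeqNat_zero]
  · simp only [if_neg h0]
    have h1 : 1 ≤ n.toNat := by
      unfold Pre_twoSeq at hpre; omega
    rw [twoSeqAltGo_eq n.toNat h1]
    ring
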